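-- pv_equiv track=rewrite | github.com/davidiach/erdos97 | scripts/check_n9_base_apex_low_excess_ledgers.py | distance_profiles
-- ===== SOURCE A (Python) =====
-- from typing import Any, Iterable, Sequence
--
-- def binom2(value: int) -> int:
--     """Return binom(value, 2)."""
--
--     if value < 0:
--         raise ValueError(f"value must be nonnegative, got {value}")
--     return value * (value - 1) // 2
--
-- def integer_partitions(total: int, minimum: int = 1) -> Iterable[tuple[int, ...]]:
--     """Yield nondecreasing positive integer partitions of total."""
--
--     if total < 0:
--         raise ValueError(f"total must be nonnegative, got {total}")
--     if total == 0:
--         yield ()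
--         return
--     for first in range(minimum, total + 1):
--         for rest in integer_partitions(total - first, first):
--             yield (first, *rest)
--
-- def distance_profiles(n: int, witness_size: int) -> list[tuple[int, tuple[int, ...]]]:
--     """Return independently enumerated profile-excess rows."""
--
--     baseline = binom2(witness_size)
--     rows = []
--     for ascending_parts in integer_partitions(n - 1):
--         parts = tuple(reversed(ascending_parts))
--         if max(parts, default=0) < witness_size:
--             continue
--         excess = sum(binom2(part) for part in parts) - baseline
--         rows.append((excess, parts))
--     return sorted(rows, key=lambda row: (row[0], row[1]))
-- ===== SOURCE B (Python) =====
-- def distance_profiles(n, witness_size):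
--     """Return independently enumerated profile-excess rows.
--
--     Bottom-up dynamic programming over a table of sub-partition lists instead of
--     the naive recursive generator: table[t][m-1] holds the ascending partitions
--     of t with parts >= m, each computed once and shared.
--     """
--     total = n - 1
--     if total < 0:
--         raise ValueError(f"total must be nonnegative, got {total}")
--     if witness_size < 0:
--         raise ValueError(f"value must be nonnegative, got {witness_size}")
--     table = []
--     for t in range(total + 1):
--         row = []
--         for m in range(1, t + 1):
--             acc = []
--             for first in range(m, t + 1):
--                 rem = t - first
--                 if rem == 0:
--                     acc.append((first,))
--                 elif first <= rem:
--                     for rest in table[rem][first - 1]: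
--                         acc.append((first,) + rest)
--             row.append(acc)
--         table.append(row)
--     partitions = [()] if total == 0 else table[total][0]
--     baseline = witness_size * (witness_size - 1) // 2
--     rows = []
--     for ascending in partitions:
--         largest = ascending[-1] if ascending else 0
--         if largest >= witness_size:
--             parts = tuple(reversed(ascending))
--             rows.append((sum(p * (p - 1) // 2 for p in parts) - baseline, parts))
--     return sorted(rows, key=lambda row: (row[0], row[1]))
-- ===== Notes on version B (the rewrite author's own statement) =====
-- stated objective: alternative
-- what changed: Replaces A's naive recursive partition generator (which re-solves overlapping (total, minimum) subproblems exponentially often) by a bottom-up dynamic-programming table that computes each subproblem's partition list once and shares it; the filter/excess/sort stage is a single pass over that list.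
import Mathlib
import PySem

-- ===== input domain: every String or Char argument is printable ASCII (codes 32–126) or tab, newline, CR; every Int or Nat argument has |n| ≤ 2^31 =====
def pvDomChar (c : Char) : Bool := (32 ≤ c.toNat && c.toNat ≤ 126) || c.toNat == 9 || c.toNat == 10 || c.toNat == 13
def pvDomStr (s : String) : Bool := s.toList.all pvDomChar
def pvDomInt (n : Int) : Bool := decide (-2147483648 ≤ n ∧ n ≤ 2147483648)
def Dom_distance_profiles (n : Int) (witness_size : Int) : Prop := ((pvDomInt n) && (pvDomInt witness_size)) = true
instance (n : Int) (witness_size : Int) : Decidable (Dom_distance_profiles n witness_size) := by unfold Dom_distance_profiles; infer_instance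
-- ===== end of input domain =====

-- B replaces A's naive recursive partition generator by a bottom-up dynamic-programming table of
-- shared sub-partition lists (each (total, minimum) subproblem computed once); same rows, same sort.

-- ===== PORT A =====

-- binom2(value) for the calls A makes: Pre_ keeps witness_size ≥ 0 and every partition part is ≥ 1,
-- so the ValueError branch is never reached on admitted inputs.
def pyBinom2 (v : Int) : Int := PySem.Int.floordiv (v * (v - 1)) 2

-- integer_partitions(total, minimum): the recursive generator, as the list it yields in order.
-- The `0 < first` guard only makes the recursion total; every call A performs has minimum ≥ 1,
-- where the guard is always true (with minimum = 0 Python recurses forever).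
def partsA (total : Nat) (minimum : Nat) : List (List Int) :=
  if total = 0 then [[]]
  else (List.range' minimum (total + 1 - minimum)).attach.flatMap
      (fun ⟨first, hf⟩ =>
        if h1 : 0 < first then
          (partsA (total - first) first).map (fun rest => (first : Int) :: rest)
        else [])
termination_by total
decreasing_by
  rename_i ht
  have := List.mem_range'_1.mp hf
  omega

def distance_profiles (n : Int) (witness_size : Int) : List (Int × List Int) :=
  let baseline := pyBinom2 witness_size
  let rows := (partsA (n - 1).toNat 1).foldl
    (fun rows ascending_parts =>
      let parts := ascending_parts.reverse
      if PySem.List.maxD parts (fun x => x) 0 < witness_size then rows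
      else rows ++ [((parts.map pyBinom2).sum - baseline, parts)]) []
  PySem.List.sorted2 rows (fun row => row.1) (fun row => row.2)

-- ===== PORT B =====

def altBinom (v : Int) : Int := PySem.Int.floordiv (v * (v - 1)) 2

-- the body of Source B's outer table loop (one row of the DP table appended)
def tblStep (table : List (List (List (List Int)))) (t : Nat) : List (List (List (List Int))) :=
  let row := (List.range' 1 t).foldl
    (fun row m =>
      let acc := (List.range' m (t + 1 - m)).foldl
        (fun acc first =>
          let rem := t - first
          if rem = 0 then acc ++ [[(first : Int)]]
          else if first ≤ rem then
            acc ++ ((table.getD rem []).getD (first - 1) []).map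
              (fun rest => (first : Int) :: rest)
          else acc) []
      row ++ [acc]) []
  table ++ [row]

-- Source B raises exactly where A does (n - 1 < 0 or witness_size < 0); Pre_ excludes those inputs.
def distance_profiles_alt (n : Int) (witness_size : Int) : List (Int × List Int) :=
  let total := (n - 1).toNat
  let table := (List.range (total + 1)).foldl tblStep []
  let partitions := if total = 0 then [([] : List Int)] else (table.getD total []).getD 0 []
  let baseline := altBinom witness_size
  let rows := partitions.foldl
    (fun rows ascending =>
      let largest : Int := (ascending.getLast?).getD 0
      if witness_size ≤ largest then
        rows ++ [(((ascending.reverse).map altBinom).sum - baseline, ascending.reverse)]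
      else rows) []
  PySem.List.sorted2 rows (fun row => row.1) (fun row => row.2)

-- ===== PRECONDITION & SPEC =====

-- A raises ValueError when n - 1 < 0 (integer_partitions) or witness_size < 0 (binom2); Pre_ admits everything else.
def Pre_distance_profiles (n : Int) (witness_size : Int) : Prop := 1 ≤ n ∧ 0 ≤ witness_size
instance (n : Int) (witness_size : Int) : Decidable (Pre_distance_profiles n witness_size) := by
  unfold Pre_distance_profiles; infer_instance

def pvWitness_distance_profiles : Int × Int := (5, 2)

def Spec_distance_profiles (n : Int) (witness_size : Int) (out : List (Int × List Int)) : Prop :=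
  out = distance_profiles_alt n witness_size
instance (n : Int) (witness_size : Int) (out : List (Int × List Int)) : Decidable (Spec_distance_profiles n witness_size out) := by
  unfold Spec_distance_profiles; infer_instance

-- ===== CLAIM (what is proved, stated in full; the proofs are below) =====
def Claim_equal_distance_profiles : Prop := ∀ (n : Int) (witness_size : Int), Dom_distance_profiles n witness_size → Pre_distance_profiles n witness_size → Spec_distance_profiles n witness_size (distance_profiles n witness_size)

-- ===== LEMMAS AND PROOFS =====

-- partsA unfolded on the values A actually uses (minimum ≥ 1): the attach and the totality guard vanish.
lemma partsA_eq (t m : Nat) (hm : 1 ≤ m) (ht : t ≠ 0) :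
    partsA t m = (List.range' m (t + 1 - m)).flatMap
      (fun (first : Nat) => (partsA (t - first) first).map (fun rest => (first : Int) :: rest)) := by
  rw [partsA, if_neg ht]
  rw [List.flatMap_congr (g := fun (x : {x // x ∈ List.range' m (t + 1 - m)}) =>
        List.map (fun rest => ((x.1 : Nat) : Int) :: rest) (partsA (t - x.1) x.1))]
  · simp
  · rintro ⟨first, hf⟩ _
    have := List.mem_range'_1.mp hf
    simp only []
    rw [dif_pos (by omega)]

lemma partsA_zero (m : Nat) : partsA 0 m = [[]] := by rw [partsA]; rfl

lemma partsA_empty_of_lt (t m : Nat) (hm : 1 ≤ m) (ht : t ≠ 0) (h : t < m) : partsA t m = [] := by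
  rw [partsA_eq t m hm ht]
  have : t + 1 - m = 0 := by omega
  rw [this]
  rfl

-- every element of partsA t m has all parts ≥ m and all parts ≤ its last entry
lemma partsA_inv (t : Nat) : ∀ m, 1 ≤ m → ∀ p ∈ partsA t m,
    (∀ x ∈ p, (m : Int) ≤ x) ∧ (∀ x ∈ p, x ≤ p.getLast?.getD 0) := by
  induction t using Nat.strong_induction_on with
  | _ t ih =>
    intro m hm p hp
    by_cases ht : t = 0
    · subst ht
      rw [partsA_zero] at hp
      simp at hp
      subst hp
      simp
    · rw [partsA_eq t m hm ht] at hp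
      simp only [List.mem_flatMap, List.mem_map] at hp
      obtain ⟨first, hfr, rest, hrest, hpe⟩ := hp
      have hfr' := List.mem_range'_1.mp hfr
      have h1 : 1 ≤ first := by omega
      subst hpe
      have hrec := ih (t - first) (by omega) first h1 rest hrest
      constructor
      · intro x hx
        rcases List.mem_cons.mp hx with h | h
        · subst h; exact_mod_cast Int.ofNat_le.mpr hfr'.1
        · have := hrec.1 x h
          have : (first : Int) ≤ x := this
          have : (m : Int) ≤ (first : Int) := by exact_mod_cast hfr'.1
          omega
      · intro x hx
        cases rest with
        | nil =>
          simp at hx ⊢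
          omega
        | cons r rs =>
          have hlast : ((first : Int) :: r :: rs).getLast? = (r :: rs).getLast? := by
            simp [List.getLast?_cons_cons]
          rw [hlast]
          rcases List.mem_cons.mp hx with h | h
          · subst h
            have hrm : r ∈ r :: rs := List.mem_cons_self
            have h1' : (first : Int) ≤ r := hrec.1 r hrm
            have h2' : r ≤ (r :: rs).getLast?.getD 0 := hrec.2 r hrm
            omega
          · exact hrec.2 x h

-- max(parts, default=0) of the reversed (descending) partition is the last ascending part
lemma maxD_reverse_eq_last (p : List Int) (hub : ∀ x ∈ p, x ≤ p.getLast?.getD 0) :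
    PySem.List.maxD p.reverse (fun x => x) 0 = p.getLast?.getD 0 := by
  by_cases hpe : p = []
  · subst hpe; rfl
  · have hne : p.reverse ≠ [] := by simp [hpe]
    obtain ⟨mv, hmv⟩ : ∃ mv, PySem.List.max? p.reverse (fun x => x) = some mv := by
      cases hmx : PySem.List.max? p.reverse (fun x => x) with
      | none => exact absurd ((PySem.List.max?_eq_none_iff _ _).mp hmx) hne
      | some v => exact ⟨v, rfl⟩
    have hmem : mv ∈ p := by
      have := PySem.List.max?_mem hmv
      rwa [List.mem_reverse] at this
    have hmax : ∀ y ∈ p, y ≤ mv := by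
      intro y hy
      exact PySem.List.max?_isMax hmv y (List.mem_reverse.mpr hy)
    have hlmem : p.getLast?.getD 0 ∈ p := by
      rw [List.getLast?_eq_some_getLast hpe, Option.getD_some]
      exact List.getLast_mem _
    have h1 : mv ≤ p.getLast?.getD 0 := hub mv hmem
    have h2 : p.getLast?.getD 0 ≤ mv := hmax _ hlmem
    simp [PySem.List.maxD, hmv]
    omega

-- the table rows B builds, named
def tblSpec (t : Nat) : List (List (List Int)) := (List.range' 1 t).map (fun m => partsA t m)

lemma tblSpec_lookup (k rem first : Nat) (h1 : 1 ≤ first) (h2 : first ≤ rem) (h3 : rem < k) :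
    (((List.range k).map tblSpec).getD rem []).getD (first - 1) [] = partsA rem first := by
  have e1 : ((List.range k).map tblSpec).getD rem [] = tblSpec rem := by
    rw [List.getD_eq_getElem?_getD]
    rw [List.getElem?_map]
    rw [List.getElem?_range h3]
    rfl
  rw [e1]
  unfold tblSpec
  rw [List.getD_eq_getElem?_getD, List.getElem?_map]
  have hlt : first - 1 < (List.range' 1 rem).length := by simp; omega
  rw [List.getElem?_eq_getElem hlt]
  simp only [Option.map_some, Option.getD_some]
  congr 1
  rw [List.getElem_range']
  omega

lemma tblStep_acc (k m : Nat) (hm : 1 ≤ m) (hmk : m ≤ k) :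
    (List.range' m (k + 1 - m)).foldl
      (fun acc first =>
        let rem := k - first
        if rem = 0 then acc ++ [[(first : Int)]]
        else if first ≤ rem then
          acc ++ ((((List.range k).map tblSpec).getD rem []).getD (first - 1) []).map
            (fun rest => (first : Int) :: rest)
        else acc) [] = partsA k m := by
  have hcong : ∀ (acc : List (List Int)), ∀ first ∈ List.range' m (k + 1 - m),
      (let rem := k - first
       if rem = 0 then acc ++ [[(first : Int)]]
       else if first ≤ rem then
         acc ++ ((((List.range k).map tblSpec).getD rem []).getD (first - 1) []).map
           (fun rest => (first : Int) :: rest)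
       else acc)
      = acc ++ (partsA (k - first) first).map (fun rest => (first : Int) :: rest) := by
    intro acc first hf
    have hfr := List.mem_range'_1.mp hf
    have h1 : 1 ≤ first := by omega
    by_cases h0 : k - first = 0
    · simp [h0, partsA_zero]
    · rw [if_neg h0]
      by_cases hle : first ≤ k - first
      · rw [if_pos hle]
        rw [tblSpec_lookup k (k - first) first h1 hle (by omega)]
      · rw [if_neg hle]
        rw [partsA_empty_of_lt (k - first) first h1 h0 (by omega)]
        simp
  rw [PySem.List.foldl_congr_mem _ _
      (fun acc first => acc ++ (partsA (k - first) first).map (fun rest => (first : Int) :: rest))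
      [] hcong]
  rw [PySem.List.foldl_append_eq_flatMap]
  rw [partsA_eq k m hm (by omega)]
  rfl

lemma tblBuild (K : Nat) :
    (List.range K).foldl tblStep [] = (List.range K).map tblSpec := by
  induction K with
  | zero => rfl
  | succ k ih =>
    rw [List.range_succ, List.foldl_append, List.foldl_cons, List.foldl_nil, ih]
    rw [List.map_append]
    show tblStep ((List.range k).map tblSpec) k = _
    unfold tblStep
    simp only [List.map_cons, List.map_nil]
    congr 1
    rw [PySem.List.foldl_congr_mem _ _
        (fun row m => row ++ [partsA k m]) []
        (by
          intro row m hmem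
          have hm := List.mem_range'_1.mp hmem
          rw [tblStep_acc k m (by omega) (by omega)])]
    rw [PySem.List.foldl_append_eq_flatMap]
    unfold tblSpec
    rw [List.nil_append, ← List.map_eq_flatMap]

-- B's partitions value is exactly A's generator output
lemma alt_partitions (T : Nat) :
    (if T = 0 then [([] : List Int)]
     else ((((List.range (T + 1)).foldl tblStep []).getD T []).getD 0 [])) = partsA T 1 := by
  by_cases hT : T = 0
  · subst hT
    rw [if_pos rfl, partsA_zero]
  · rw [if_neg hT, tblBuild]
    exact tblSpec_lookup (T + 1) T 1 (by omega) (by omega) (by omega)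

-- ===== VERDICT (by name: the statement is the Claim_ definition above) =====
theorem distance_profiles_spec : Claim_equal_distance_profiles := by
  intro n witness_size hdom hpre
  unfold Spec_distance_profiles
  simp only [distance_profiles, distance_profiles_alt]
  rw [alt_partitions ((n - 1).toNat)]
  congr 1
  apply PySem.List.foldl_congr_mem
  intro acc p hp
  have hinv := partsA_inv ((n - 1).toNat) 1 (by omega) p hp
  have hmax := maxD_reverse_eq_last p hinv.2
  rw [hmax]
  have hb : altBinom = pyBinom2 := rfl
  rw [hb]
  by_cases h : p.getLast?.getD 0 < witness_size
  · rw [if_pos h, if_neg (by omega)]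
  · rw [if_neg h, if_pos (by omega)]
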